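-- pv_equiv track=rewrite | github.com/mahnoorfatima997/macad-thesis-25 | thesis-agents/data_collection/interaction_logger.py | _classify_move_type
-- ===== SOURCE A (Python) =====
-- def _classify_move_type(sentence: str, current_phase: str) -> str:
--     """Classify the type of design move based on content and phase"""
--
--     sentence_lower = sentence.lower()
--
--     # Phase-specific move classification
--     if current_phase == "ideation":
--         if any(word in sentence_lower for word in ["concept", "idea", "approach", "strategy", "vision"]):
--             return "synthesis"
--         elif any(word in sentence_lower for word in ["explore", "consider", "think about", "what if"]):
--             return "analysis"
--         elif any(word in sentence_lower for word in ["precedent", "example", "reference"]):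
--             return "analysis"
--
--     elif current_phase == "visualization":
--         if any(word in sentence_lower for word in ["form", "shape", "massing", "volume", "proportion"]):
--             return "transformation"
--         elif any(word in sentence_lower for word in ["circulation", "flow", "layout", "plan"]):
--             return "synthesis"
--         elif any(word in sentence_lower for word in ["sketch", "drawing", "model", "3d"]):
--             return "transformation"
--
--     elif current_phase == "materialization":
--         if any(word in sentence_lower for word in ["construction", "structure", "system", "detail"]):
--             return "transformation"
--         elif any(word in sentence_lower for word in ["technical", "engineering", "performance"]):
--             return "evaluation"
--         elif any(word in sentence_lower for word in ["cost", "budget", "timeline", "schedule"]):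
--             return "evaluation"
--
--     # General move classification
--     if any(word in sentence_lower for word in ["i think", "i believe", "my approach", "i realize"]):
--         return "reflection"
--     elif any(word in sentence_lower for word in ["because", "therefore", "thus", "consequently"]):
--         return "evaluation"
--     elif any(word in sentence_lower for word in ["how", "why", "what if", "consider"]):
--         return "analysis"
--
--     # Default classification
--     return "general"
-- ===== SOURCE B (Python) =====
-- # B: one flat pass with a best-(priority,result) accumulator over all applicable
-- # keywords, instead of A's staged if/elif any() chains; the lowest-priority match wins.
-- _PHASE_BLOCKS = {
--     "ideation": [
--         (["concept", "idea", "approach", "strategy", "vision"], "synthesis"),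
--         (["explore", "consider", "think about", "what if"], "analysis"),
--         (["precedent", "example", "reference"], "analysis"),
--     ],
--     "visualization": [
--         (["form", "shape", "massing", "volume", "proportion"], "transformation"),
--         (["circulation", "flow", "layout", "plan"], "synthesis"),
--         (["sketch", "drawing", "model", "3d"], "transformation"),
--     ],
--     "materialization": [
--         (["construction", "structure", "system", "detail"], "transformation"),
--         (["technical", "engineering", "performance"], "evaluation"),
--         (["cost", "budget", "timeline", "schedule"], "evaluation"),
--     ],
-- }
--
-- _GENERAL_BLOCKS = [
--     (["i think", "i believe", "my approach", "i realize"], "reflection"),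
--     (["because", "therefore", "thus", "consequently"], "evaluation"),
--     (["how", "why", "what if", "consider"], "analysis"),
-- ]
--
--
-- def _rules_for(phase):
--     """Flatten the applicable blocks into (keyword, priority, result) triples."""
--     blocks = _PHASE_BLOCKS.get(phase, []) + _GENERAL_BLOCKS
--     return [(kw, prio, res)
--             for prio, (kws, res) in enumerate(blocks)
--             for kw in kws]
--
--
-- def _classify_move_type(sentence: str, current_phase: str) -> str:
--     s = sentence.lower()
--     best = None  # (priority, result) of the best keyword hit so far
--     for kw, prio, res in _rules_for(current_phase):
--         if kw in s and (best is None or prio < best[0]):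
--             best = (prio, res)
--     return best[1] if best is not None else "general"
-- ===== Notes on version B (the rewrite author's own statement) =====
-- stated objective: alternative
-- what changed: Replaces A's staged if/elif any() chains with a single flat pass over (keyword, priority, result) triples keeping a minimum-priority accumulator; the lowest-priority matching keyword determines the result, which coincides with A's first-matching-block rule.
import Mathlib
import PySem

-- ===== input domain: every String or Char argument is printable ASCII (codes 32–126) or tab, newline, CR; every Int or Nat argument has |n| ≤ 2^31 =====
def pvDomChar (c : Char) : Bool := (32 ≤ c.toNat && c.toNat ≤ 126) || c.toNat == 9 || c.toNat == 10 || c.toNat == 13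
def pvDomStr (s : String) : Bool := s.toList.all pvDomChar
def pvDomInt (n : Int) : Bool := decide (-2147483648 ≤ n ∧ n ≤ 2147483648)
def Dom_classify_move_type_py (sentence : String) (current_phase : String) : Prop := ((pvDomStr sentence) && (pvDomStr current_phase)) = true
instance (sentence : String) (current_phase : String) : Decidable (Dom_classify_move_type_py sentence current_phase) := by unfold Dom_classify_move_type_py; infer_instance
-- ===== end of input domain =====

-- B replaces A's staged if/elif any() chains with one flat pass over (keyword, priority, result) triples keeping a minimum-priority accumulator; objective: alternative.

-- ===== PORT A =====
-- A's fall-through from the phase-specific block into the general block is the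
-- let-bound `general` continuation (the general block appears once in A's source).
def classify_move_type_py (sentence : String) (current_phase : String) : String :=
  let sl := PySem.Str.lower sentence
  let general : String :=
    if (["i think", "i believe", "my approach", "i realize"].any (fun w => PySem.Str.isIn w sl)) then "reflection"
    else if (["because", "therefore", "thus", "consequently"].any (fun w => PySem.Str.isIn w sl)) then "evaluation"
    else if (["how", "why", "what if", "consider"].any (fun w => PySem.Str.isIn w sl)) then "analysis"
    else "general"
  if current_phase = "ideation" then
    if (["concept", "idea", "approach", "strategy", "vision"].any (fun w => PySem.Str.isIn w sl)) then "synthesis"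
    else if (["explore", "consider", "think about", "what if"].any (fun w => PySem.Str.isIn w sl)) then "analysis"
    else if (["precedent", "example", "reference"].any (fun w => PySem.Str.isIn w sl)) then "analysis"
    else general
  else if current_phase = "visualization" then
    if (["form", "shape", "massing", "volume", "proportion"].any (fun w => PySem.Str.isIn w sl)) then "transformation"
    else if (["circulation", "flow", "layout", "plan"].any (fun w => PySem.Str.isIn w sl)) then "synthesis"
    else if (["sketch", "drawing", "model", "3d"].any (fun w => PySem.Str.isIn w sl)) then "transformation"
    else general
  else if current_phase = "materialization" then
    if (["construction", "structure", "system", "detail"].any (fun w => PySem.Str.isIn w sl)) then "transformation"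
    else if (["technical", "engineering", "performance"].any (fun w => PySem.Str.isIn w sl)) then "evaluation"
    else if (["cost", "budget", "timeline", "schedule"].any (fun w => PySem.Str.isIn w sl)) then "evaluation"
    else general
  else general

-- ===== PORT B =====
def pvPhaseBlocks : PySem.Dict String (List (List String × String)) :=
  PySem.Dict.ofList
    [ ("ideation",
        [ (["concept", "idea", "approach", "strategy", "vision"], "synthesis")
        , (["explore", "consider", "think about", "what if"], "analysis")
        , (["precedent", "example", "reference"], "analysis") ])
    , ("visualization",
        [ (["form", "shape", "massing", "volume", "proportion"], "transformation")
        , (["circulation", "flow", "layout", "plan"], "synthesis")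
        , (["sketch", "drawing", "model", "3d"], "transformation") ])
    , ("materialization",
        [ (["construction", "structure", "system", "detail"], "transformation")
        , (["technical", "engineering", "performance"], "evaluation")
        , (["cost", "budget", "timeline", "schedule"], "evaluation") ]) ]

def pvGeneralBlocks : List (List String × String) :=
  [ (["i think", "i believe", "my approach", "i realize"], "reflection")
  , (["because", "therefore", "thus", "consequently"], "evaluation")
  , (["how", "why", "what if", "consider"], "analysis") ]

-- _rules_for: flatten the applicable blocks into (keyword, priority, result) triples
def pvRulesFor (phase : String) : List (String × Int × String) :=
  (PySem.List.enumerate ((PySem.Dict.getD pvPhaseBlocks phase []) ++ pvGeneralBlocks)).flatMap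
    (fun pe => pe.2.1.map (fun kw => (kw, pe.1, pe.2.2)))

-- one loop step: `if kw in s and (best is None or prio < best[0]): best = (prio, res)`
def pvStep (s : String) (best : Option (Int × String)) (e : String × Int × String) : Option (Int × String) :=
  if PySem.Str.isIn e.1 s && (match best with | none => true | some b => decide (e.2.1 < b.1))
  then some e.2 else best

def classify_move_type_py_alt (sentence : String) (current_phase : String) : String :=
  let s := PySem.Str.lower sentence
  match (pvRulesFor current_phase).foldl (pvStep s) none with
  | some b => b.2
  | none => "general"

-- ===== PRECONDITION & SPEC =====
def Spec_classify_move_type_py (sentence : String) (current_phase : String) (out : String) : Prop := out = classify_move_type_py_alt sentence current_phase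
instance (sentence : String) (current_phase : String) (out : String) : Decidable (Spec_classify_move_type_py sentence current_phase out) := by unfold Spec_classify_move_type_py; infer_instance

-- ===== CLAIM =====
def Claim_equal_classify_move_type_py : Prop := ∀ (sentence : String) (current_phase : String), Dom_classify_move_type_py sentence current_phase → Spec_classify_move_type_py sentence current_phase (classify_move_type_py sentence current_phase)

-- ===== LEMMAS AND PROOFS =====

-- Once `best` is set, entries of priority ≥ best's never update the accumulator.
theorem pvFoldStay (s : String) (l : List (String × Int × String)) (p : Int) (r : String)
    (h : ∀ e ∈ l, p ≤ e.2.1) :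
    l.foldl (pvStep s) (some (p, r)) = some (p, r) := by
  induction l with
  | nil => rfl
  | cons e rest ih =>
      have hp : pvStep s (some (p, r)) e = some (p, r) := by
        unfold pvStep
        have : ¬ e.2.1 < p := not_lt.mpr (h e (List.mem_cons_self ..))
        simp [this]
      rw [List.foldl_cons, hp]
      exact ih (fun e' he' => h e' (List.mem_cons_of_mem _ he'))

-- Resolving one block of same-priority keywords from the `none` state, when every
-- later entry has priority ≥ p, gives A's if-shape.
theorem pvBlock (s : String) (p : Int) (r : String) (kws : List String)
    (rest : List (String × Int × String)) (h : ∀ e ∈ rest, p ≤ e.2.1) :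
    ((kws.map (fun k => (k, p, r)) ++ rest).foldl (pvStep s) none) =
      if kws.any (fun k => PySem.Str.isIn k s) then some (p, r)
      else rest.foldl (pvStep s) none := by
  induction kws with
  | nil => simp
  | cons k ks ih =>
      by_cases hk : PySem.Str.isIn k s = true
      · have h1 : pvStep s none (k, p, r) = some (p, r) := by
          simp only [pvStep, hk]; rfl
        rw [List.map_cons, List.cons_append, List.foldl_cons, h1,
            List.foldl_append, pvFoldStay s _ p r (by intro e he; simp at he; obtain ⟨a, _, rfl⟩ := he; exact le_refl p),
            pvFoldStay s rest p r h]
        simp only [List.any_cons, hk, Bool.true_or]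
        rfl
      · have hk' : PySem.Str.isIn k s = false := by rwa [Bool.not_eq_true] at hk
        have h1 : pvStep s none (k, p, r) = none := by
          simp only [pvStep, hk']; rfl
        rw [List.map_cons, List.cons_append, List.foldl_cons, h1, ih]
        simp only [List.any_cons, hk', Bool.false_or]

-- expose B's let-bound state for rewriting
theorem pvAltEq (sentence phase : String) :
    classify_move_type_py_alt sentence phase =
      (match (pvRulesFor phase).foldl (pvStep (PySem.Str.lower sentence)) none with
       | some b => b.2 | none => "general") := rfl

theorem pvResolveIf (c : Bool) (p : Int) (r : String) (o : Option (Int × String)) (g : String) :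
    (match (if c = true then some (p, r) else o) with | some b => b.2 | none => g)
      = if c = true then r else (match o with | some b => b.2 | none => g) := by
  by_cases h : c = true <;> simp [h]

-- ===== VERDICT =====
theorem classify_move_type_py_spec : Claim_equal_classify_move_type_py := by
  intro sentence current_phase _
  unfold Spec_classify_move_type_py classify_move_type_py
  rw [pvAltEq]
  by_cases h1 : current_phase = "ideation"
  · subst h1
    rw [if_pos rfl,
        show pvRulesFor "ideation" =
          (["concept", "idea", "approach", "strategy", "vision"].map (fun k => (k, (0:Int), "synthesis")) ++
          (["explore", "consider", "think about", "what if"].map (fun k => (k, (1:Int), "analysis")) ++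
          (["precedent", "example", "reference"].map (fun k => (k, (2:Int), "analysis")) ++
          (["i think", "i believe", "my approach", "i realize"].map (fun k => (k, (3:Int), "reflection")) ++
          (["because", "therefore", "thus", "consequently"].map (fun k => (k, (4:Int), "evaluation")) ++
          (["how", "why", "what if", "consider"].map (fun k => (k, (5:Int), "analysis")) ++
          ([] : List (String × Int × String)))))))) from rfl,
        pvBlock _ _ _ _ _ (by decide), pvBlock _ _ _ _ _ (by decide),
        pvBlock _ _ _ _ _ (by decide), pvBlock _ _ _ _ _ (by decide),
        pvBlock _ _ _ _ _ (by decide), pvBlock _ _ _ _ _ (by decide)]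
    simp only [pvResolveIf, List.foldl_nil]
  · by_cases h2 : current_phase = "visualization"
    · subst h2
      rw [if_neg (by decide), if_pos rfl,
          show pvRulesFor "visualization" =
            (["form", "shape", "massing", "volume", "proportion"].map (fun k => (k, (0:Int), "transformation")) ++
            (["circulation", "flow", "layout", "plan"].map (fun k => (k, (1:Int), "synthesis")) ++
            (["sketch", "drawing", "model", "3d"].map (fun k => (k, (2:Int), "transformation")) ++
            (["i think", "i believe", "my approach", "i realize"].map (fun k => (k, (3:Int), "reflection")) ++
            (["because", "therefore", "thus", "consequently"].map (fun k => (k, (4:Int), "evaluation")) ++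
            (["how", "why", "what if", "consider"].map (fun k => (k, (5:Int), "analysis")) ++
            ([] : List (String × Int × String)))))))) from rfl,
          pvBlock _ _ _ _ _ (by decide), pvBlock _ _ _ _ _ (by decide),
          pvBlock _ _ _ _ _ (by decide), pvBlock _ _ _ _ _ (by decide),
          pvBlock _ _ _ _ _ (by decide), pvBlock _ _ _ _ _ (by decide)]
      simp only [pvResolveIf, List.foldl_nil]
    · by_cases h3 : current_phase = "materialization"
      · subst h3
        rw [if_neg (by decide), if_neg (by decide), if_pos rfl,
            show pvRulesFor "materialization" =
              (["construction", "structure", "system", "detail"].map (fun k => (k, (0:Int), "transformation")) ++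
              (["technical", "engineering", "performance"].map (fun k => (k, (1:Int), "evaluation")) ++
              (["cost", "budget", "timeline", "schedule"].map (fun k => (k, (2:Int), "evaluation")) ++
              (["i think", "i believe", "my approach", "i realize"].map (fun k => (k, (3:Int), "reflection")) ++
              (["because", "therefore", "thus", "consequently"].map (fun k => (k, (4:Int), "evaluation")) ++
              (["how", "why", "what if", "consider"].map (fun k => (k, (5:Int), "analysis")) ++
              ([] : List (String × Int × String)))))))) from rfl,
            pvBlock _ _ _ _ _ (by decide), pvBlock _ _ _ _ _ (by decide),
            pvBlock _ _ _ _ _ (by decide), pvBlock _ _ _ _ _ (by decide),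
            pvBlock _ _ _ _ _ (by decide), pvBlock _ _ _ _ _ (by decide)]
        simp only [pvResolveIf, List.foldl_nil]
      · rw [if_neg h1, if_neg h2, if_neg h3]
        have hd : PySem.Dict.getD pvPhaseBlocks current_phase [] = [] := by
          rw [PySem.Dict.getD_eq_get?_getD,
              show pvPhaseBlocks = PySem.Dict.mk pvPhaseBlocks.items from rfl]
          rw [show (pvPhaseBlocks).items
            = [ ("ideation",
                  [ (["concept", "idea", "approach", "strategy", "vision"], ("synthesis" : String))
                  , (["explore", "consider", "think about", "what if"], "analysis")
                  , (["precedent", "example", "reference"], "analysis") ])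
              , ("visualization",
                  [ (["form", "shape", "massing", "volume", "proportion"], "transformation")
                  , (["circulation", "flow", "layout", "plan"], "synthesis")
                  , (["sketch", "drawing", "model", "3d"], "transformation") ])
              , ("materialization",
                  [ (["construction", "structure", "system", "detail"], "transformation")
                  , (["technical", "engineering", "performance"], "evaluation")
                  , (["cost", "budget", "timeline", "schedule"], "evaluation") ]) ] from rfl]
          simp [Ne.symm h1, Ne.symm h2, Ne.symm h3, PySem.Dict.get?]
        rw [show pvRulesFor current_phase =
            (PySem.List.enumerate (PySem.Dict.getD pvPhaseBlocks current_phase [] ++ pvGeneralBlocks)).flatMap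
              (fun pe => pe.2.1.map (fun kw => (kw, pe.1, pe.2.2))) from rfl, hd,
            show (PySem.List.enumerate (([] : List (List String × String)) ++ pvGeneralBlocks)).flatMap
              (fun pe => pe.2.1.map (fun kw => (kw, pe.1, pe.2.2))) =
              (["i think", "i believe", "my approach", "i realize"].map (fun k => (k, (0:Int), "reflection")) ++
              (["because", "therefore", "thus", "consequently"].map (fun k => (k, (1:Int), "evaluation")) ++
              (["how", "why", "what if", "consider"].map (fun k => (k, (2:Int), "analysis")) ++
              ([] : List (String × Int × String))))) from rfl,
            pvBlock _ _ _ _ _ (by decide), pvBlock _ _ _ _ _ (by decide),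
            pvBlock _ _ _ _ _ (by decide)]
        simp only [pvResolveIf, List.foldl_nil]
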